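-- pv_equiv track=rewrite | github.com/stuart-bradley/code_interview_practice | Recursion_And_Dynamic_Programming.py | exercise_7
-- ===== SOURCE A (Python) =====
-- def exercise_7(string):
-- 	permutations = {}
-- 	for i in range(1, len(string)):
-- 		if i == 1:
-- 			permutations[1] = []
-- 			for item in string:
-- 				permutations[1].append(item)
-- 		else:
-- 			permutations[i] = []
-- 			for subset in permutations[i-1]:
-- 				for item in permutations[1]:
-- 					if item[0] not in subset:
-- 						permutations[i].append(subset+item)
-- 	return [val for sublist in permutations.values() for val in sublist]
-- ===== SOURCE B (Python) =====
-- def exercise_7(string):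
--     # One depth-first walk over value-distinct prefixes (index-lexicographic order),
--     # bucketed by length, instead of A's breadth-first length-indexed DP dictionary.
--     n = len(string)
--     buckets = [[] for _ in range(n)]
--     def walk(prefix):
--         d = len(prefix)
--         if d > 0:
--             buckets[d].append(prefix)
--         if d < n - 1:
--             for c in string:
--                 if c not in prefix:
--                     walk(prefix + c)
--     if n > 0:
--         walk('')
--     result = []
--     for b in buckets[1:]:
--         result += b
--     return result
-- ===== Notes on version B (the rewrite author's own statement) =====
-- stated objective: alternative
-- what changed: Replaces the length-indexed DP dictionary (each level built by extending the previous level's strings with unused characters) by a direct recursive enumeration of all k-permutations of the characters in index-lexicographic order, keeping those with k distinct character values.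
import Mathlib
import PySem

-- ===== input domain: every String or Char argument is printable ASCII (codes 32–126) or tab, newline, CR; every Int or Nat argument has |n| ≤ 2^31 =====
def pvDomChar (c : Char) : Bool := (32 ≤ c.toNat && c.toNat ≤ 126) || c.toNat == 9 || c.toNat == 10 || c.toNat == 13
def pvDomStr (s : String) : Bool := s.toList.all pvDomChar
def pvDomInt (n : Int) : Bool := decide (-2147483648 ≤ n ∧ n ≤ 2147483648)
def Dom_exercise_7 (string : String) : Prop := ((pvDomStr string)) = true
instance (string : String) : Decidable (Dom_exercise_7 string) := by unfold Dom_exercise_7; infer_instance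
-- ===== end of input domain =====

-- B replaces A's length-indexed DP dictionary by a direct recursive enumeration of all
-- k-permutations (index-lexicographic order) filtered to distinct character values; same results.

-- ===== PORT A =====
-- Python str is modelled as List Char (PySem convention); dict levels hold lists of char-lists,
-- converted to String at the return boundary.
def exercise_7 (string : String) : List String :=
  let cs := string.toList
  let permutations : PySem.Dict Int (List (List Char)) :=
    (PySem.List.pyRange 1 (cs.length : Int)).foldl (fun d i =>
      if i = 1 then
        let d := d.insert 1 []
        cs.foldl (fun d item => d.modify 1 [] (fun l => l ++ [[item]])) d
      else
        let d := d.insert i []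
        (d.getD (i - 1) []).foldl (fun d subset =>
          (d.getD 1 []).foldl (fun d item =>
            match PySem.List.pyGet? item 0 with
            | none => d            -- item[0]: unreachable (level-1 entries are singletons)
            | some c0 =>
              if PySem.Chars.isIn [c0] subset then d
              else d.modify i [] (fun l => l ++ [subset ++ item])) d) d)
      PySem.Dict.empty
  (permutations.values.foldl (fun acc sublist => acc ++ sublist) []).map String.ofList

-- ===== PORT B =====
-- perms of Source B is ported as walkB; recursion terminates since n-1-len(prefix) decreases.
def walkB (cs : List Char) (n : Nat) (pre : List Char)
    (buckets : List (List (List Char))) : List (List (List Char)) :=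
  let d := pre.length
  let buckets := if 0 < d then buckets.set d (buckets.getD d [] ++ [pre]) else buckets
  if _h : d < n - 1 then
    cs.foldl (fun b c => if c ∉ pre then walkB cs n (pre ++ [c]) b else b) buckets
  else buckets
termination_by n - 1 - pre.length
decreasing_by simp; omega

def exercise_7_alt (string : String) : List String :=
  let cs := string.toList
  let n := cs.length
  let buckets := List.replicate n ([] : List (List Char))
  let buckets := if 0 < n then walkB cs n [] buckets else buckets
  ((buckets.drop 1).foldl (fun result b => result ++ b) []).map String.ofList


-- ===== PRECONDITION & SPEC =====
def Spec_exercise_7 (string : String) (out : List String) : Prop := out = exercise_7_alt string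
instance (string : String) (out : List String) : Decidable (Spec_exercise_7 string out) := by unfold Spec_exercise_7; infer_instance

-- ===== CLAIM (what is proved, stated in full; the proofs are below) =====
def Claim_equal_exercise_7 : Prop := ∀ (string : String), Dom_exercise_7 string → Spec_exercise_7 string (exercise_7 string)

-- ===== LEMMAS AND PROOFS =====

def extLevel (cs : List Char) (L : List (List Char)) : List (List Char) :=
  L.flatMap (fun p => (cs.filter (fun c => decide (c ∉ p))).map (fun c => p ++ [c]))

def levelA (cs : List Char) : Nat → List (List Char)
  | 0 => [[]]
  | k + 1 => extLevel cs (levelA cs k)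

theorem filterMap_if {α β : Type} (l : List α) (q : α → Bool) (f : α → β) :
    l.filterMap (fun x => if q x then some (f x) else none) = (l.filter q).map f := by
  induction l with
  | nil => rfl
  | cons a t ih => rw [List.filter_cons, List.filterMap_cons]; cases h : q a <;> simp [ih]

def stepA (cs : List Char) (d : PySem.Dict Int (List (List Char))) (i : Int) :
    PySem.Dict Int (List (List Char)) :=
  if i = 1 then
    let d := d.insert 1 []
    cs.foldl (fun d item => d.modify 1 [] (fun l => l ++ [[item]])) d
  else
    let d := d.insert i []
    (d.getD (i - 1) []).foldl (fun d subset =>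
      (d.getD 1 []).foldl (fun d item =>
        match PySem.List.pyGet? item 0 with
        | none => d
        | some c0 =>
          if PySem.Chars.isIn [c0] subset then d
          else d.modify i [] (fun l => l ++ [subset ++ item])) d) d

theorem A_unfold (s : String) : exercise_7 s =
    (((PySem.List.pyRange 1 (s.toList.length : Int)).foldl (stepA s.toList)
        PySem.Dict.empty).values.foldl (fun acc sublist => acc ++ sublist) []).map String.ofList := rfl

def bfun (sub item : List Char) : Option (List Char) :=
  match PySem.List.pyGet? item 0 with
  | none => none
  | some c0 => if PySem.Chars.isIn [c0] sub then none else some (sub ++ item)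

theorem get?_mk_skip (l post : List (Int × List (List Char))) (j : Int)
    (h : ∀ q ∈ l, q.1 ≠ j) :
    (PySem.Dict.mk (l ++ post)).get? j = (PySem.Dict.mk post).get? j := by
  induction l with
  | nil => rfl
  | cons a t ih =>
    rw [List.cons_append, PySem.Dict.get?_mk_cons]
    rw [if_neg (by simpa using h a (by simp))]
    exact ih (fun q hq => h q (by simp [hq]))

theorem get?_mk_append (l post : List (Int × List (List Char))) (j : Int) :
    (PySem.Dict.mk (l ++ post)).get? j
      = ((PySem.Dict.mk l).get? j).or ((PySem.Dict.mk post).get? j) := by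
  induction l with
  | nil => rfl
  | cons a t ih =>
    rw [List.cons_append, PySem.Dict.get?_mk_cons, PySem.Dict.get?_mk_cons]
    by_cases hj : (a.1 == j) = true
    · rw [if_pos hj, if_pos hj]; rfl
    · rw [if_neg hj, if_neg hj]; exact ih

theorem get?_mk_range' (F : Nat → List (List Char)) (m : Nat) :
    ∀ (a j : Nat), a ≤ j → j < a + m →
    (PySem.Dict.mk ((List.range' a m).map (fun (t : Nat) => ((t : Int), F t)))).get? (j : Int)
      = some (F j) := by
  induction m with
  | zero => intro a j h1 h2; omega
  | succ m ih =>
    intro a j h1 h2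
    rw [List.range'_succ, List.map_cons, PySem.Dict.get?_mk_cons]
    by_cases hja : j = a
    · subst hja; rw [if_pos (by simp)]
    · rw [if_neg (by simp; omega)]
      exact ih (a + 1) j (by omega) (by omega)

theorem modify_mk_last (pre : List (Int × List (List Char))) (k : Int)
    (hpre : ∀ q ∈ pre, q.1 ≠ k) (acc : List (List Char)) (s : List Char) :
    (PySem.Dict.mk (pre ++ [(k, acc)])).modify k [] (fun v => v ++ [s])
      = PySem.Dict.mk (pre ++ [(k, acc ++ [s])]) := by
  have hget : (PySem.Dict.mk (pre ++ [(k, acc)])).get? k = some acc := by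
    rw [get?_mk_skip pre [(k, acc)] k hpre, PySem.Dict.get?_mk_cons]
    simp
  have hgetD : (PySem.Dict.mk (pre ++ [(k, acc)])).getD k [] = acc := by
    rw [PySem.Dict.getD_eq_get?_getD, hget]; rfl
  have hcont : (PySem.Dict.mk (pre ++ [(k, acc)])).contains k = true := by
    rw [PySem.Dict.contains_eq_isSome_get?, hget]; rfl
  show (PySem.Dict.mk (pre ++ [(k, acc)])).insert k
      ((PySem.Dict.mk (pre ++ [(k, acc)])).getD k [] ++ [s]) = _
  rw [hgetD]
  apply PySem.Dict.ext
  rw [PySem.Dict.items_insert_of_contains _ _ hcont]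
  show (pre ++ [(k, acc)]).map _ = _
  rw [List.map_append]
  congr 1
  · have hid : ∀ p ∈ pre, (if (p.1 == k) = true then (k, acc ++ [s]) else p) = id p := by
      intro p hp
      rw [if_neg (by simpa using hpre p hp)]
      rfl
    rw [List.map_congr_left hid, List.map_id]
  · simp

theorem fold_append_last {α : Type} (l : List α) (b : α → Option (List Char)) (k : Int)
    (pre : List (Int × List (List Char))) (hpre : ∀ q ∈ pre, q.1 ≠ k) (acc : List (List Char)) :
    l.foldl (fun d x => match b x with
      | none => d
      | some s => d.modify k [] (fun v => v ++ [s])) (PySem.Dict.mk (pre ++ [(k, acc)]))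
    = PySem.Dict.mk (pre ++ [(k, acc ++ l.filterMap b)]) := by
  induction l generalizing acc with
  | nil => simp
  | cons a t ih =>
    rw [List.foldl_cons, List.filterMap_cons]
    cases hb : b a with
    | none => exact ih acc
    | some s =>
      dsimp only
      rw [modify_mk_last pre k hpre acc s, ih (acc ++ [s])]
      simp

theorem fold_subsets (subsets : List (List Char)) (k : Int)
    (pre : List (Int × List (List Char))) (hpre : ∀ q ∈ pre, q.1 ≠ k)
    (L1 : List (List Char))
    (hL1 : ∀ acc, (PySem.Dict.mk (pre ++ [(k, acc)])).getD 1 [] = L1)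
    (acc : List (List Char)) :
    subsets.foldl (fun d subset =>
      (d.getD 1 []).foldl (fun d item =>
        match PySem.List.pyGet? item 0 with
        | none => d
        | some c0 =>
          if PySem.Chars.isIn [c0] subset then d
          else d.modify k [] (fun l => l ++ [subset ++ item])) d)
      (PySem.Dict.mk (pre ++ [(k, acc)]))
    = PySem.Dict.mk (pre ++ [(k, acc ++ subsets.flatMap (fun sub => L1.filterMap (bfun sub)))]) := by
  induction subsets generalizing acc with
  | nil => simp
  | cons sub t ih =>
    rw [List.foldl_cons]
    rw [show ∀ (d : PySem.Dict Int (List (List Char))), d.getD 1 [] = d.getD 1 [] from fun _ => rfl]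
    rw [hL1 acc]
    have hbody : (fun (d : PySem.Dict Int (List (List Char))) (item : List Char) =>
        match PySem.List.pyGet? item 0 with
        | none => d
        | some c0 =>
          if PySem.Chars.isIn [c0] sub then d
          else d.modify k [] (fun l => l ++ [sub ++ item]))
        = (fun d x => match bfun sub x with
        | none => d
        | some s => d.modify k [] (fun v => v ++ [s])) := by
      funext d x
      unfold bfun
      cases PySem.List.pyGet? x 0 with
      | none => rfl
      | some c0 => by_cases h : PySem.Chars.isIn [c0] sub = true <;> simp [h]
    rw [hbody, fold_append_last L1 (bfun sub) k pre hpre acc, ih (acc ++ L1.filterMap (bfun sub))]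
    simp

theorem levelA_one (cs : List Char) : levelA cs 1 = cs.map (fun c => [c]) := by
  show extLevel cs [[]] = _
  simp [extLevel]

theorem filterMap_bfun (sub cs : List Char) :
    (cs.map (fun c => [c])).filterMap (bfun sub)
      = (cs.filter (fun c => decide (c ∉ sub))).map (fun c => sub ++ [c]) := by
  rw [List.filterMap_map]
  have h1 : ∀ c : Char, (bfun sub ∘ fun c => [c]) c
      = if decide (c ∉ sub) then some (sub ++ [c]) else none := by
    intro c
    show bfun sub [c] = _
    unfold bfun
    have : PySem.List.pyGet? [c] 0 = some c := rfl
    rw [this]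
    have hiff : PySem.Chars.isIn [c] sub = true ↔ c ∈ sub := by
      rw [PySem.Chars.isIn_iff_infix]
      exact List.singleton_infix_iff c sub
    by_cases hc : c ∈ sub <;> simp [hiff, hc]
  rw [funext h1, filterMap_if]

theorem A_fold (cs : List Char) (m : Nat) :
    (PySem.List.pyRange 1 (m : Int)).foldl (stepA cs) PySem.Dict.empty
      = PySem.Dict.mk ((List.range' 1 (m - 1)).map (fun (t : Nat) => ((t : Int), levelA cs t))) := by
  induction m with
  | zero => rfl
  | succ m ih =>
    cases m with
    | zero => rfl
    | succ m0 =>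
      rw [show ((m0 + 1 + 1 : Nat) : Int) = ((m0 + 1 : Nat) : Int) + 1 by push_cast; ring]
      rw [PySem.List.pyRange_one_succ_right (by push_cast; omega), List.foldl_append, ih]
      rw [List.foldl_cons, List.foldl_nil]
      cases m0 with
      | zero =>
        -- i = 1 : first level
        show stepA cs _ 1 = _
        unfold stepA
        rw [if_pos rfl]
        have hins : (PySem.Dict.mk ([] : List (Int × List (List Char)))).insert 1 []
            = PySem.Dict.mk ([] ++ [((1 : Int), ([] : List (List Char)))]) := by
          apply PySem.Dict.ext
          rw [PySem.Dict.items_insert_of_not_contains _ _ rfl]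
        show (cs.foldl _ ((PySem.Dict.mk []).insert 1 [])) = _
        rw [hins]
        have hbody : (fun (d : PySem.Dict Int (List (List Char))) (item : Char) =>
            d.modify 1 [] (fun l => l ++ [[item]]))
            = (fun d x => match some [x] with
              | none => d
              | some s => d.modify 1 [] (fun v => v ++ [s])) := by
          funext d x; rfl
        rw [hbody, fold_append_last cs (fun x => some [x]) 1 [] (by simp) []]
        have : cs.filterMap (fun x => some [x]) = cs.map (fun c => [c]) := by
          simp
        rw [this]
        simp [levelA_one]
      | succ m1 =>
        simp only [Nat.add_sub_cancel]
        set F := fun (t : Nat) => ((t : Int), levelA cs t) with hF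
        set pre := (List.range' 1 (m1 + 1)).map F with hpre'
        set i : Int := ((m1 + 1 + 1 : Nat) : Int) with hi
        have hfresh : ∀ q ∈ pre, q.1 ≠ i := by
          intro q hq
          rw [hpre'] at hq
          obtain ⟨t, ht, rfl⟩ := List.mem_map.mp hq
          have := List.mem_range'_1.mp ht
          simp only [hF, hi]
          intro hc
          have : t = m1 + 1 + 1 := by exact_mod_cast hc
          omega
        show stepA cs (PySem.Dict.mk pre) i = _
        unfold stepA
        rw [if_neg (by rw [hi]; push_cast; omega)]
        have hget0 : (PySem.Dict.mk pre).get? i = none := by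
          have h := get?_mk_skip pre [] i hfresh
          rw [List.append_nil] at h
          exact h
        have hins : (PySem.Dict.mk pre).insert i []
            = PySem.Dict.mk (pre ++ [(i, ([] : List (List Char)))]) := by
          apply PySem.Dict.ext
          rw [PySem.Dict.items_insert_of_not_contains _ _
            (by rw [PySem.Dict.contains_eq_isSome_get?, hget0]; rfl)]
        show ((((PySem.Dict.mk pre).insert i []).getD (i - 1) []).foldl _
          ((PySem.Dict.mk pre).insert i [])) = _
        rw [hins]
        have hgetPrev : (PySem.Dict.mk (pre ++ [(i, ([] : List (List Char)))])).getD (i - 1) []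
            = levelA cs (m1 + 1) := by
          have h1 : (i - 1) = ((m1 + 1 : Nat) : Int) := by rw [hi]; push_cast; ring
          have h2 : (PySem.Dict.mk pre).get? ((m1 + 1 : Nat) : Int) = some (levelA cs (m1 + 1)) :=
            get?_mk_range' (levelA cs) (m1 + 1) 1 (m1 + 1) (by omega) (by omega)
          rw [h1, PySem.Dict.getD_eq_get?_getD, get?_mk_append, h2]
          rfl
        have hL1 : ∀ acc, (PySem.Dict.mk (pre ++ [(i, acc)])).getD 1 [] = levelA cs 1 := by
          intro acc
          have h2 : (PySem.Dict.mk pre).get? ((1 : Nat) : Int) = some (levelA cs 1) :=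
            get?_mk_range' (levelA cs) (m1 + 1) 1 1 (by omega) (by omega)
          rw [PySem.Dict.getD_eq_get?_getD, show (1 : Int) = ((1 : Nat) : Int) from rfl,
            get?_mk_append, h2]
          rfl
        rw [hgetPrev]
        rw [fold_subsets (levelA cs (m1 + 1)) i pre hfresh (levelA cs 1) hL1 []]
        have hflat : (levelA cs (m1 + 1)).flatMap
            (fun sub => (levelA cs 1).filterMap (bfun sub)) = levelA cs (m1 + 1 + 1) := by
          rw [levelA_one]
          have : ∀ sub ∈ levelA cs (m1 + 1), (cs.map (fun c => [c])).filterMap (bfun sub)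
              = (cs.filter (fun c => decide (c ∉ sub))).map (fun c => sub ++ [c]) :=
            fun sub _ => filterMap_bfun sub cs
          rw [List.flatMap_congr this]
          rfl
        rw [List.nil_append, hflat]
        apply PySem.Dict.ext
        show pre ++ [(i, levelA cs (m1 + 1 + 1))] = (List.range' 1 (m1 + 1 + 1)).map F
        rw [List.range'_concat, List.map_append, ← hpre']
        have : 1 + 1 * (m1 + 1) = m1 + 1 + 1 := by omega
        rw [this, hi, hF]
        simp

theorem A_char (s : String) : exercise_7 s =
    (List.range' 1 (s.toList.length - 1)).flatMap (fun k => (levelA s.toList k).map String.ofList) := by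
  rw [A_unfold, A_fold]
  rw [PySem.List.foldl_append_eq_flatten]
  simp only [PySem.Dict.values, List.nil_append, List.map_map]
  rw [List.flatten_eq_flatMap, List.flatMap_map, List.map_flatMap]
  rfl



theorem flatMap_single {α β : Type} (l : List α) (f : α → β) :
    l.flatMap (fun x => [f x]) = l.map f := by
  induction l with
  | nil => rfl
  | cons a t ih => simp_all

def grow (cs pre : List Char) : Nat → List (List Char)
  | 0 => [pre]
  | m + 1 => (cs.filter (fun c => decide (c ∉ pre))).flatMap (fun c => grow cs (pre ++ [c]) m)

theorem grow_succ_last (cs : List Char) (m : Nat) : ∀ pre,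
    grow cs pre (m + 1) = (grow cs pre m).flatMap
      (fun q => (cs.filter (fun c => decide (c ∉ q))).map (fun c => q ++ [c])) := by
  induction m with
  | zero =>
    intro pre
    show (cs.filter _).flatMap (fun c => grow cs (pre ++ [c]) 0) = _
    simp only [grow]
    rw [List.flatMap_singleton]
    exact flatMap_single _ _
  | succ m ih =>
    intro pre
    show (cs.filter _).flatMap (fun c => grow cs (pre ++ [c]) (m + 1)) = _
    conv_rhs => rw [show grow cs pre (m + 1) = (cs.filter (fun c => decide (c ∉ pre))).flatMap
        (fun c => grow cs (pre ++ [c]) m) from rfl]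
    rw [List.flatMap_assoc]
    apply List.flatMap_congr
    intro c _
    exact ih (pre ++ [c])

theorem levelA_eq_grow (cs : List Char) (k : Nat) : levelA cs k = grow cs [] k := by
  induction k with
  | zero => rfl
  | succ k ih =>
    show extLevel cs (levelA cs k) = _
    rw [ih, grow_succ_last]
    rfl

def appIdx (bs : List (List (List Char))) (F : Nat → List (List Char)) :
    List (List (List Char)) :=
  match bs with
  | [] => []
  | b :: t => (b ++ F 0) :: appIdx t (fun j => F (j + 1))

theorem appIdx_length (bs : List (List (List Char))) (F : Nat → List (List Char)) :
    (appIdx bs F).length = bs.length := by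
  induction bs generalizing F with
  | nil => rfl
  | cons b t ih => simp [appIdx, ih]

theorem appIdx_congr (bs : List (List (List Char))) (F G : Nat → List (List Char))
    (h : ∀ j, j < bs.length → F j = G j) : appIdx bs F = appIdx bs G := by
  induction bs generalizing F G with
  | nil => rfl
  | cons b t ih =>
    simp only [appIdx]
    rw [h 0 (by simp), ih _ _ (fun j hj => h (j + 1) (by simpa using hj))]

theorem appIdx_nilF (bs : List (List (List Char))) (F : Nat → List (List Char))
    (h : ∀ j, j < bs.length → F j = []) : appIdx bs F = bs := by
  induction bs generalizing F with
  | nil => rfl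
  | cons b t ih =>
    simp only [appIdx]
    rw [h 0 (by simp), List.append_nil, ih _ (fun j hj => h (j + 1) (by simpa using hj))]

theorem appIdx_appIdx (bs : List (List (List Char))) (F G : Nat → List (List Char)) :
    appIdx (appIdx bs F) G = appIdx bs (fun j => F j ++ G j) := by
  induction bs generalizing F G with
  | nil => rfl
  | cons b t ih => simp [appIdx, ih]

theorem set_append_appIdx (bs : List (List (List Char))) (d : Nat) (x : List Char) :
    bs.set d (bs.getD d [] ++ [x]) = appIdx bs (fun j => if j = d then [x] else []) := by
  induction bs generalizing d with
  | nil => rfl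
  | cons b t ih =>
    cases d with
    | zero =>
      simp only [List.set, List.getD, appIdx]
      rw [appIdx_nilF _ _ (fun j _ => by simp)]
      rfl
    | succ d =>
      simp only [List.set, appIdx, if_neg (by omega : ¬ (0 : Nat) = d + 1)]
      rw [List.append_nil]
      show b :: t.set d (t.getD d [] ++ [x]) = b :: appIdx t _
      rw [ih d]
      congr 1
      apply appIdx_congr
      intro j _
      by_cases hj : j = d <;> simp [hj]

theorem fold_walk (f : List (List (List Char)) → Char → List (List (List Char)))
    (G : Char → Nat → List (List Char)) (nn : Nat)
    (ch : List Char)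
    (h : ∀ c ∈ ch, ∀ b : List (List (List Char)), b.length ≤ nn → f b c = appIdx b (G c)) :
    ∀ b0 : List (List (List Char)), b0.length ≤ nn →
      ch.foldl f b0 = appIdx b0 (fun j => ch.flatMap (fun c => G c j)) := by
  induction ch with
  | nil => intro b0 _; rw [List.foldl_nil, appIdx_nilF]; intro j _; rfl
  | cons c t ih =>
    intro b0 hb0
    rw [List.foldl_cons, h c (by simp) b0 hb0,
      ih (fun c' hc' => h c' (by simp [hc']))
        (appIdx b0 (G c)) (by rw [appIdx_length]; exact hb0),
      appIdx_appIdx]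
    apply appIdx_congr
    intro j _
    simp

theorem walk_char (cs : List Char) : ∀ (fuel : Nat) (pre : List Char)
    (bs : List (List (List Char))),
    pre.length + fuel = cs.length - 1 → bs.length ≤ cs.length →
    walkB cs cs.length pre bs
      = appIdx bs (fun j => if pre.length ≤ j ∧ 1 ≤ j then grow cs pre (j - pre.length) else []) := by
  intro fuel
  induction fuel with
  | zero =>
    intro pre bs hf hb
    rw [walkB]
    rw [dif_neg (by omega)]
    by_cases hd : 0 < pre.length
    · rw [if_pos hd, set_append_appIdx]
      apply appIdx_congr
      intro j hj
      have hn : cs.length = pre.length + 1 := by omega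
      have : j ≤ pre.length := by omega
      by_cases hjd : j = pre.length
      · subst hjd; rw [if_pos rfl, if_pos (by omega)]; simp [grow]
      · rw [if_neg hjd, if_neg (by omega)]
    · rw [if_neg hd]
      rw [appIdx_nilF]
      intro j hj
      rw [if_neg (by omega)]
  | succ fuel ih =>
    intro pre bs hf hb
    rw [walkB]
    rw [dif_pos (by omega)]
    have hb1 : (if 0 < pre.length then bs.set pre.length (bs.getD pre.length [] ++ [pre]) else bs)
        = appIdx bs (fun j => if j = pre.length ∧ 0 < pre.length then [pre] else []) := by
      by_cases hd : 0 < pre.length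
      · rw [if_pos hd, set_append_appIdx]
        apply appIdx_congr
        intro j _
        by_cases hjd : j = pre.length <;> simp [hjd, hd]
      · rw [if_neg hd, appIdx_nilF]
        intro j _
        rw [if_neg (by omega)]
    rw [hb1]
    rw [PySem.List.foldl_ite_eq_foldl_filter (fun c => c ∉ pre)
      (fun b c => walkB cs cs.length (pre ++ [c]) b)]
    rw [fold_walk (fun b c => walkB cs cs.length (pre ++ [c]) b)
      (fun c j => if pre.length + 1 ≤ j ∧ 1 ≤ j then grow cs (pre ++ [c]) (j - (pre.length + 1)) else [])
      cs.length _
      (fun c _ b hble => by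
        have := ih (pre ++ [c]) b (by simp; omega) hble
        simpa using this)
      _ (by rw [appIdx_length]; exact hb)]
    rw [appIdx_appIdx]
    apply appIdx_congr
    intro j hj
    have hjn : j < cs.length := by omega
    by_cases hj1 : j < pre.length
    · rw [if_neg (by omega), if_neg (by omega), List.nil_append]
      have : ∀ c ∈ cs.filter (fun c => decide (c ∉ pre)),
          (if pre.length + 1 ≤ j ∧ 1 ≤ j then grow cs (pre ++ [c]) (j - (pre.length + 1)) else []) = ([] : List (List Char)) :=
        fun c _ => by rw [if_neg (by omega)]
      rw [List.flatMap_congr this]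
      simp
    · by_cases hjd : j = pre.length
      · subst hjd
        by_cases hd : 0 < pre.length
        · rw [if_pos ⟨rfl, hd⟩, if_pos (by omega)]
          have : ∀ c ∈ cs.filter (fun c => decide (c ∉ pre)),
              (if pre.length + 1 ≤ pre.length ∧ 1 ≤ pre.length then grow cs (pre ++ [c]) (pre.length - (pre.length + 1)) else []) = ([] : List (List Char)) :=
            fun c _ => by rw [if_neg (by omega)]
          rw [List.flatMap_congr this]
          simp [grow]
        · rw [if_neg (by omega), if_neg (by omega), List.nil_append]
          have : ∀ c ∈ cs.filter (fun c => decide (c ∉ pre)),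
              (if pre.length + 1 ≤ pre.length ∧ 1 ≤ pre.length then grow cs (pre ++ [c]) (pre.length - (pre.length + 1)) else []) = ([] : List (List Char)) :=
            fun c _ => by rw [if_neg (by omega)]
          rw [List.flatMap_congr this]
          simp
      · -- j > pre.length
        have hgt : pre.length < j := by omega
        rw [if_neg (by omega), List.nil_append, if_pos (by omega)]
        have : ∀ c ∈ cs.filter (fun c => decide (c ∉ pre)),
            (if pre.length + 1 ≤ j ∧ 1 ≤ j then grow cs (pre ++ [c]) (j - (pre.length + 1)) else [])
              = grow cs (pre ++ [c]) (j - (pre.length + 1)) :=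
          fun c _ => by rw [if_pos (by omega)]
        rw [List.flatMap_congr this]
        have hsub : j - pre.length = (j - (pre.length + 1)) + 1 := by omega
        rw [hsub]
        rfl

theorem appIdx_replicate (n : Nat) (F : Nat → List (List Char)) :
    appIdx (List.replicate n []) F = (List.range n).map F := by
  induction n generalizing F with
  | zero => rfl
  | succ n ih =>
    rw [List.replicate_succ, List.range_succ_eq_map]
    show ([] ++ F 0) :: appIdx (List.replicate n []) (fun j => F (j + 1)) = _
    rw [ih, List.map_cons, List.map_map]
    simp [Function.comp_def]

theorem B_char (s : String) : exercise_7_alt s =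
    (List.range' 1 (s.toList.length - 1)).flatMap (fun k => (levelA s.toList k).map String.ofList) := by
  show (((if 0 < s.toList.length then walkB s.toList s.toList.length []
      (List.replicate s.toList.length []) else List.replicate s.toList.length []).drop 1).foldl
      (fun result b => result ++ b) []).map String.ofList = _
  by_cases hn : 0 < s.toList.length
  · rw [if_pos hn]
    rw [walk_char s.toList (s.toList.length - 1) [] _ (by simp) (by simp)]
    rw [appIdx_replicate]
    have hrange : List.range s.toList.length
        = 0 :: List.range' 1 (s.toList.length - 1) := by
      rw [List.range_eq_range']
      cases h : s.toList.length with
      | zero => omega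
      | succ m => rw [List.range'_succ]; simp
    rw [hrange, List.map_cons, List.drop_one, List.tail_cons]
    rw [PySem.List.foldl_append_eq_flatten, List.nil_append, List.flatten_eq_flatMap,
      List.flatMap_map, List.map_flatMap]
    apply List.flatMap_congr
    intro j hj
    have hj1 : 1 ≤ j := (List.mem_range'_1.mp hj).1
    rw [if_pos (by simpa using hj1)]
    rw [show j - List.length [] = j by simp, ← levelA_eq_grow]
    rfl
  · rw [if_neg hn]
    have : s.toList.length = 0 := by omega
    rw [this]
    rfl

-- ===== VERDICT (by name: the statement is the Claim_ definition above) =====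
theorem exercise_7_spec : Claim_equal_exercise_7 := by
  intro s _
  unfold Spec_exercise_7
  rw [A_char, B_char]
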